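-- pv_equiv track=rewrite | github.com/phbrownacmorg/canvas_scripts | read_courses.py | make_course_id
-- ===== SOURCE A (Python) =====
-- def make_course_id(id_list: list[str]) -> str:
--     id_list = [id for id in id_list if len(id) > 0]
--     assert len(id_list) > 1 # Must be at least two ID's
--     # Extract the term (with its leading hyphen) from the first course
--     term = id_list[0][-8:]
--     assert len(term) == 8, 'No term on first id'
--     # Remove all the terms
--     id_list = list(map(lambda elt: elt[:-8], id_list))
--     id_list.sort() # Ensure that common prefixes happen together
--
--     result = id_list[0]
--     prefix = result[:3]
--     for i in range(1, len(id_list)):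
--         if id_list[i][:3] == prefix:
--             result = result + '/' + id_list[i][3:]
--         else:
--             result = result + '/' + id_list[i]
--             prefix = id_list[i][:3]
--
--     assert len(result) > 0, 'Empty result'
--     return result + term
-- ===== SOURCE B (Python) =====
-- def _parts(stems):
--     """Group the sorted stems: each group keeps its first element whole and
--     drops the 3-char prefix from the rest."""
--     if not stems:
--         return []
--     key = stems[0][:3]
--     n = 1
--     while n < len(stems) and stems[n][:3] == key:
--         n += 1
--     return [stems[0]] + [e[3:] for e in stems[1:n]] + _parts(stems[n:])
--
-- def make_course_id(id_list: list[str]) -> str: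
--     ids = [i for i in id_list if len(i) > 0]
--     assert len(ids) > 1  # Must be at least two ID's
--     term = ids[0][-8:]
--     assert len(term) == 8, 'No term on first id'
--     stems = sorted(e[:-8] for e in ids)
--     result = '/'.join(_parts(stems))
--     assert len(result) > 0, 'Empty result'
--     return result + term
-- ===== Notes on version B (the rewrite author's own statement) =====
-- stated objective: alternative
-- what changed: Replaces A's running-prefix/result string accumulator loop with an explicit grouping pass: the sorted stems are split into maximal equal-prefix runs (first element whole, the rest with the 3-char prefix dropped) and the parts are joined once with '/'.
-- outside the precondition, e.g. on make_course_id([]): A raises AssertionError, B raises AssertionError; on make_course_id(['ABC-1']): A raises AssertionError, B raises AssertionError; on make_course_id(['ABC-1', 'DEF-2']): A raises AssertionError, B raises AssertionError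
import Mathlib
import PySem

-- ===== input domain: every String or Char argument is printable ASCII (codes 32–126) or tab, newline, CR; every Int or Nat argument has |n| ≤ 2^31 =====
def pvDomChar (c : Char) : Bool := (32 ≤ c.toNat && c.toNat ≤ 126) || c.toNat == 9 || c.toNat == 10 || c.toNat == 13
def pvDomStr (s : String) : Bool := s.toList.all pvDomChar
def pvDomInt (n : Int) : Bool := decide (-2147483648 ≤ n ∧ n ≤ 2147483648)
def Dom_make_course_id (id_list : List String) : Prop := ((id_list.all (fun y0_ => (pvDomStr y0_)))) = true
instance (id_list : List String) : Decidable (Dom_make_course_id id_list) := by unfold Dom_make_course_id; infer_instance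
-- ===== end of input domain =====

-- B replaces A's running-prefix/result accumulator loop with an explicit grouping pass over the
-- sorted stems (split off each maximal equal-prefix run, then join the parts once); objective: alternative decomposition.

-- ===== PORT A =====
def make_course_id (id_list : List String) : String :=
  -- id_list = [id for id in id_list if len(id) > 0]
  let ids : List (List Char) := (id_list.map String.toList).filter (fun s => decide (0 < s.length))
  -- term = id_list[0][-8:]   (ids nonempty and first id ≥ 8 chars by Pre_, so both asserts pass)
  let term : List Char := PySem.List.slice (ids.headD []) (some (-8)) none
  -- id_list = list(map(lambda elt: elt[:-8], id_list)); id_list.sort()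
  let stems : List (List Char) :=
    PySem.List.sorted (ids.map (fun e => PySem.List.slice e none (some (-8)))) (fun x => x) false
  -- result = id_list[0]; prefix = result[:3]; for i in range(1, len(id_list)): …
  let st : List Char × List Char :=
    (PySem.List.pyRange 1 (PySem.List.len stems) 1).foldl
      (fun (st : List Char × List Char) i =>
        if PySem.List.slice (PySem.List.pyGetD stems i []) none (some 3) == st.2 then
          (st.1 ++ '/' :: PySem.List.slice (PySem.List.pyGetD stems i []) (some 3) none, st.2)
        else
          (st.1 ++ '/' :: PySem.List.pyGetD stems i [],
           PySem.List.slice (PySem.List.pyGetD stems i []) none (some 3)))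
      (stems.headD [], PySem.List.slice (stems.headD []) none (some 3))
  -- return result + term
  String.ofList (st.1 ++ term)

-- ===== PORT B =====
-- _parts(stems): first element of each maximal equal-prefix run kept whole, the rest with the 3-char prefix dropped
def pvParts : List (List Char) → List (List Char)
  | [] => []
  | x :: xs =>
    let key := PySem.List.slice x none (some 3)
    let same := xs.takeWhile (fun e => PySem.List.slice e none (some 3) == key)
    let rest := xs.dropWhile (fun e => PySem.List.slice e none (some 3) == key)
    x :: (same.map (fun e => PySem.List.slice e (some 3) none) ++ pvParts rest)
termination_by stems => stems.length
decreasing_by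
  have := List.length_dropWhile_le
    (p := fun e => PySem.List.slice e none (some 3) == PySem.List.slice x none (some 3)) (l := xs)
  simp only [List.length_cons]; omega

def make_course_id_alt (id_list : List String) : String :=
  let ids : List (List Char) := (id_list.map String.toList).filter (fun s => decide (0 < s.length))
  let term : List Char := PySem.List.slice (ids.headD []) (some (-8)) none
  let stems : List (List Char) :=
    PySem.List.sorted (ids.map (fun e => PySem.List.slice e none (some (-8)))) (fun x => x) false
  -- result = '/'.join(_parts(stems)); return result + term
  String.ofList (PySem.Chars.join ['/'] (pvParts stems) ++ term)

-- ===== PRECONDITION & SPEC =====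
-- Pre_ excludes exactly the inputs where A's asserts raise AssertionError: fewer than two
-- nonempty ids, or a first nonempty id shorter than 8 characters (no 8-char term).
def Pre_make_course_id (id_list : List String) : Prop :=
  1 < ((id_list.map String.toList).filter (fun s => decide (0 < s.length))).length ∧
  8 ≤ (((id_list.map String.toList).filter (fun s => decide (0 < s.length))).headD []).length
instance (id_list : List String) : Decidable (Pre_make_course_id id_list) := by
  unfold Pre_make_course_id; infer_instance

def pvWitness_make_course_id : List String := ["ACG-115-01-2223-S2", "BIO-101-01-2223-S2"]

def Spec_make_course_id (id_list : List String) (out : String) : Prop := out = make_course_id_alt id_list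
instance (id_list : List String) (out : String) : Decidable (Spec_make_course_id id_list out) := by
  unfold Spec_make_course_id; infer_instance

-- ===== CLAIM (what is proved, stated in full; the proofs are below) =====
def Claim_equal_make_course_id : Prop := ∀ (id_list : List String), Dom_make_course_id id_list → Pre_make_course_id id_list → Spec_make_course_id id_list (make_course_id id_list)

-- ===== LEMMAS AND PROOFS =====

-- A's loop body, as a named function
def pvStep (st : List Char × List Char) (e : List Char) : List Char × List Char :=
  if PySem.List.slice e none (some 3) == st.2 then
    (st.1 ++ '/' :: PySem.List.slice e (some 3) none, st.2)
  else
    (st.1 ++ '/' :: e, PySem.List.slice e none (some 3))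

-- the tail of the parts list A's loop produces when the running prefix is p
def pvPartsFrom (p : List Char) : List (List Char) → List (List Char)
  | [] => []
  | e :: es =>
    (if PySem.List.slice e none (some 3) == p then PySem.List.slice e (some 3) none else e)
      :: pvPartsFrom (PySem.List.slice e none (some 3)) es

theorem pvFoldl_eq (xs : List (List Char)) : ∀ (r p : List Char),
    (xs.foldl pvStep (r, p)).1
      = r ++ ((pvPartsFrom p xs).map (fun q => '/' :: q)).flatten := by
  induction xs with
  | nil => intro r p; simp [pvPartsFrom]
  | cons e es ih =>
    intro r p
    simp only [List.foldl_cons, pvStep, pvPartsFrom]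
    by_cases h : PySem.List.slice e none (some 3) == p
    · have hp : PySem.List.slice e none (some 3) = p := by simpa using h
      simp [hp, ih]
    · simp [h, ih]

theorem pvPartsFrom_eq (xs : List (List Char)) : ∀ (k : List Char),
    pvPartsFrom k xs
      = (xs.takeWhile (fun e => PySem.List.slice e none (some 3) == k)).map
          (fun e => PySem.List.slice e (some 3) none)
        ++ pvParts (xs.dropWhile (fun e => PySem.List.slice e none (some 3) == k)) := by
  induction xs with
  | nil => intro k; simp [pvPartsFrom, pvParts]
  | cons e es ih =>
    intro k
    by_cases h : PySem.List.slice e none (some 3) == k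
    · have hk : PySem.List.slice e none (some 3) = k := by simpa using h
      simp only [pvPartsFrom, List.takeWhile_cons, List.dropWhile_cons, hk]
      simp [ih k]
    · simp only [pvPartsFrom, List.takeWhile_cons, List.dropWhile_cons, h]
      rw [pvParts.eq_def]
      simp [ih (PySem.List.slice e none (some 3))]

theorem pvParts_cons (x : List Char) (xs : List (List Char)) :
    pvParts (x :: xs) = x :: pvPartsFrom (PySem.List.slice x none (some 3)) xs := by
  rw [pvParts.eq_def, pvPartsFrom_eq]

theorem pvJoin_cons (x : List Char) (ps : List (List Char)) :
    PySem.Chars.join ['/'] (x :: ps) = x ++ (ps.map (fun q => '/' :: q)).flatten := by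
  induction ps generalizing x with
  | nil => simp [PySem.Chars.join_singleton]
  | cons y r ih =>
    rw [PySem.Chars.join_cons_cons, ih y]
    simp

-- A's index loop over the sorted stems computes '/'.join of B's grouped parts
theorem pvLoop_eq (stems : List (List Char)) (h : stems ≠ []) :
    ((PySem.List.pyRange 1 (PySem.List.len stems) 1).foldl
      (fun (st : List Char × List Char) i =>
        if PySem.List.slice (PySem.List.pyGetD stems i []) none (some 3) == st.2 then
          (st.1 ++ '/' :: PySem.List.slice (PySem.List.pyGetD stems i []) (some 3) none, st.2)
        else
          (st.1 ++ '/' :: PySem.List.pyGetD stems i [],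
           PySem.List.slice (PySem.List.pyGetD stems i []) none (some 3)))
      (stems.headD [], PySem.List.slice (stems.headD []) none (some 3))).1
    = PySem.Chars.join ['/'] (pvParts stems) := by
  obtain ⟨s0, rest, rfl⟩ := List.exists_cons_of_ne_nil h
  have hf := PySem.List.foldl_pyRange_pyGetD (xs := s0 :: rest) (f := pvStep)
    (d := ([] : List Char)) (a := 1)
    (init := (s0, PySem.List.slice s0 none (some 3))) (by norm_num)
  show ((PySem.List.pyRange 1 (PySem.List.len (s0 :: rest)) 1).foldl
      (fun (st : List Char × List Char) i => pvStep st (PySem.List.pyGetD (s0 :: rest) i []))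
      (s0, PySem.List.slice s0 none (some 3))).1 = _
  rw [hf]
  norm_num
  rw [pvFoldl_eq, pvParts_cons, pvJoin_cons]

theorem make_course_id_spec : Claim_equal_make_course_id := by
  intro id_list _ hpre
  unfold Spec_make_course_id make_course_id make_course_id_alt
  obtain ⟨h1, _⟩ := hpre
  simp only []
  congr 1
  rw [pvLoop_eq]
  intro hnil
  have hlen := PySem.List.length_sorted
    (xs := ((id_list.map String.toList).filter (fun s => decide (0 < s.length))).map
      (fun e => PySem.List.slice e none (some (-8)))) (key := fun x => x) (rev := false)
  rw [hnil] at hlen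
  simp at hlen
  omega
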